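-- pv_equiv track=rewrite | github.com/koriel50000/IncredibleAI | src/main/python/convert.py | divide_area
-- ===== SOURCE A (Python) =====
-- def divide_area_recursive(oddeven_board, x, y, number_of_empty):
--     oddeven_board[y][x] = 3
--     number_of_empty += 1
--     for dir in ((-1, 0), (0, -1), (1, 0), (1, 1)):
--         dx, dy = dir
--         x_ = x + dx
--         y_ = y + dy
--         if oddeven_board[y_][x_] == 0:
--             number_of_empty = divide_area_recursive(oddeven_board, x_, y_, number_of_empty)
--     return number_of_empty
--
-- def divide_area(oddeven_board, x, y):
--     if oddeven_board[y][x] == 1 or oddeven_board[y][x] == 2: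
--         return 0 # すでに分割済み
--
--     number_of_empty = divide_area_recursive(oddeven_board, x, y, 0)
--     oddeven = 1 if number_of_empty % 2 == 1 else 2
--     for y in range(1, 9):
--         for x in range(1, 9):
--             if oddeven_board[y][x] == 3:
--                 oddeven_board[y][x] == oddeven
--     return oddeven
-- ===== SOURCE B (Python) =====
-- def divide_area(oddeven_board, x, y):
--     if oddeven_board[y][x] == 1 or oddeven_board[y][x] == 2:
--         return 0  # already divided
--     number_of_empty = 0
--     stack = [(x, y)]
--     while stack:
--         cx, cy = stack.pop()
--         if oddeven_board[cy][cx] == 3: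
--             continue
--         oddeven_board[cy][cx] = 3
--         number_of_empty += 1
--         for dx, dy in ((1, 1), (1, 0), (0, -1), (-1, 0)):
--             if oddeven_board[cy + dy][cx + dx] == 0:
--                 stack.append((cx + dx, cy + dy))
--     return 1 if number_of_empty % 2 == 1 else 2
-- ===== Notes on version B (the rewrite author's own statement) =====
-- stated objective: alternative
-- what changed: The recursive flood-fill helper is replaced by an explicit stack-based fill (push neighbours in reversed direction order, mark-and-count on pop) inside divide_area itself, and the final no-op re-labelling loop of A is dropped since it has no effect; only the return value (and the identical in-place 3-marking of the board) is claimed.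
import Mathlib
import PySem

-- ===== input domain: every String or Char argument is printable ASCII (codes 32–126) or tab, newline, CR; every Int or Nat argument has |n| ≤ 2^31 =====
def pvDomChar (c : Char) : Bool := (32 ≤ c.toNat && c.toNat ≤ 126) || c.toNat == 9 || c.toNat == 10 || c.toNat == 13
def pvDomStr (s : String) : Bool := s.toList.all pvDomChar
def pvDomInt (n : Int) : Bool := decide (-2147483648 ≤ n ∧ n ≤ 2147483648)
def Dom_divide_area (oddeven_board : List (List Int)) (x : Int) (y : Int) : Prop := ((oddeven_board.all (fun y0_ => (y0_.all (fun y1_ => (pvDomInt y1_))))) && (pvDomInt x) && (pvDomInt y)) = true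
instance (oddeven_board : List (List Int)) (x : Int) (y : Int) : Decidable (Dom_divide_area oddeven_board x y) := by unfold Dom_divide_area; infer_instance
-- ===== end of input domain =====

-- B replaces A's recursive flood fill by an explicit stack-based fill and drops A's final
-- no-op re-labelling loop; equal return value is claimed (both Pythons also mutate the board
-- in place, marking the same cells 3 — the Lean ports are pure and thread the board as state).

-- shared Python-indexing helpers: board[y][x] read and write (negative-index wraparound)
def pyGet2? (b : List (List Int)) (y x : Int) : Option Int :=
  (PySem.List.pyGet? b y).bind (fun r => PySem.List.pyGet? r x)

def set2 (b : List (List Int)) (y x : Int) (v : Int) : List (List Int) :=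
  PySem.List.pySetD b y (PySem.List.pySetD (PySem.List.pyGetD b y []) x v)

-- ===== PORT A =====
-- the direction tuple of divide_area_recursive, in source order
def dirsA : List (Int × Int) := [(-1, 0), (0, -1), (1, 0), (1, 1)]

-- fuel bound for the recursion: the number of empty (0) cells (fuel `zeros + 2` is proved
-- sufficient below; `none` = IndexError or fuel exhaustion, which admitted inputs never hit)
def zeros (b : List (List Int)) : Nat :=
  (b.map (fun r => r.countP (fun v => v == 0))).sum

mutual
def visitA : Nat → List (List Int) → Int → Int → Int → Option (List (List Int) × Int)
  | 0, _, _, _, _ => none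
  | fa + 1, board, x, y, count =>
      visitDirs fa dirsA (set2 board y x 3) x y (count + 1)
  termination_by fa _ _ _ _ => (fa, 0)
def visitDirs : Nat → List (Int × Int) → List (List Int) → Int → Int → Int →
    Option (List (List Int) × Int)
  | _, [], b, _, _, c => some (b, c)
  | fa, d :: ds, b, x, y, c =>
      match pyGet2? b (y + d.2) (x + d.1) with
      | none => none
      | some v =>
        if v = 0 then
          match visitA fa b (x + d.1) (y + d.2) c with
          | none => none
          | some (b', c') => visitDirs fa ds b' x y c'
        else visitDirs fa ds b x y c
  termination_by fa ds _ _ _ _ => (fa, ds.length + 1)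
end

-- A's final double loop (a no-op except for the IndexError its reads can raise)
def checkLoop (b : List (List Int)) : Option Unit :=
  List.foldl
    (fun acc yy =>
      match acc with
      | none => none
      | some _ =>
        List.foldl
          (fun acc2 xx =>
            match acc2 with
            | none => none
            | some _ =>
              match pyGet2? b yy xx with
              | none => none
              | some v => if v = 3 then some () else some ())
          (some ()) (PySem.List.pyRange 1 9 1))
    (some ()) (PySem.List.pyRange 1 9 1)

def divide_area (oddeven_board : List (List Int)) (x : Int) (y : Int) : Int :=
  match pyGet2? oddeven_board y x with
  | none => 0
  | some v =>
    if v = 1 ∨ v = 2 then 0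
    else
      match visitA (zeros oddeven_board + 2) oddeven_board x y 0 with
      | none => 0
      | some (b', n) =>
        let oddeven : Int := if PySem.Int.mod n 2 = 1 then 1 else 2
        match checkLoop b' with
        | none => 0
        | some _ => oddeven

-- ===== PORT B =====
-- Source B's direction tuple (reversed, so that stack pops come in A's probe order)
def dirsB : List (Int × Int) := [(1, 1), (1, 0), (0, -1), (-1, 0)]

-- number of cells ≠ 3: the termination measure of Source B's while loop, with the lemmas the
-- `decreasing_by` of loopB cites
def non3 (b : List (List Int)) : Nat :=
  (b.map (fun r => r.countP (fun v => !(v == 3)))).sum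

theorem pyIdx?_lt {n : Nat} {i : Int} {k : Nat} (h : PySem.List.pyIdx? n i = some k) : k < n := by
  simp only [PySem.List.pyIdx?] at h
  split_ifs at h <;> simp_all <;> omega

theorem sum_set_nat (l : List Nat) : ∀ (i : Nat) (v : Nat), i < l.length →
    (l.set i v).sum + l.getD i 0 = l.sum + v := by
  induction l with
  | nil => intro i v h; simp at h
  | cons a t ih =>
    intro i v h
    cases i with
    | zero => simp [List.set, List.getD]; omega
    | succ n =>
      have := ih n v (by simpa using h)
      simp only [List.set, List.sum_cons, List.getD_cons_succ]
      omega

theorem non3_setRow_lt (b : List (List Int)) (ki kj : Nat)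
    (hki : ki < b.length) (hkj : kj < (b.getD ki []).length)
    (hv : (b.getD ki []).getD kj 0 ≠ 3) :
    non3 (b.set ki ((b.getD ki []).set kj 3)) < non3 b := by
  set row := b.getD ki [] with hrowdef
  set p : Int → Bool := fun v => !(v == 3) with hp
  have hrowget : row[kj] = row.getD kj 0 := (List.getD_eq_getElem _ _ (by omega)).symm
  have hv' : ¬ row[kj]?.getD 0 = 3 := by
    rw [List.getElem?_eq_getElem hkj, Option.getD_some, hrowget]; exact hv
  have hcount : (row.set kj 3).countP p = row.countP p - 1 := by
    rw [hp, List.countP_set (by omega)]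
    rw [if_pos (by simp [hrowget]; exact hv'), if_neg (by simp)]
    omega
  have hpos : 0 < row.countP p :=
    List.countP_pos_iff.mpr ⟨row[kj], List.getElem_mem _, by rw [hp]; simp [hrowget]; exact hv'⟩
  have hmap : non3 (b.set ki (row.set kj 3)) =
      ((b.map (fun r => r.countP p)).set ki ((row.set kj 3).countP p)).sum := by
    rw [non3, List.map_set]
  have hsum := sum_set_nat (b.map (fun r => r.countP p)) ki ((row.set kj 3).countP p) (by simp; omega)
  have hgetmap : (b.map (fun r => r.countP p)).getD ki 0 = row.countP p := by
    rw [List.getD_eq_getElem _ _ (by simp; omega)]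
    simp only [List.getElem_map]
    congr 1
    rw [hrowdef, List.getD_eq_getElem _ _ (by omega)]
  have hz : non3 b = (b.map (fun r => r.countP p)).sum := by rw [non3]
  omega

theorem pyGet2?_decomp {b : List (List Int)} {y x v : Int}
    (h : (PySem.List.pyGet? b y).bind (fun r => PySem.List.pyGet? r x) = some v) :
    ∃ ki kj, PySem.List.pyIdx? b.length y = some ki ∧ ki < b.length ∧
      PySem.List.pyIdx? (b.getD ki []).length x = some kj ∧ kj < (b.getD ki []).length ∧
      (b.getD ki []).getD kj 0 = v := by
  simp only [PySem.List.pyGet?] at h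
  rcases hky : PySem.List.pyIdx? b.length y with _ | ki
  · rw [hky] at h; simp at h
  · have hki : ki < b.length := pyIdx?_lt hky
    rw [hky] at h
    simp only [Option.bind_some, List.getElem?_eq_getElem hki, Option.bind_some] at h
    have hrow : b[ki] = b.getD ki [] := (List.getD_eq_getElem _ _ hki).symm
    rw [hrow] at h
    rcases hkx : PySem.List.pyIdx? (b.getD ki []).length x with _ | kj
    · rw [hkx] at h; simp at h
    · have hkj : kj < (b.getD ki []).length := pyIdx?_lt hkx
      rw [hkx] at h
      simp only [Option.bind_some, List.getElem?_eq_getElem hkj] at h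
      refine ⟨ki, kj, rfl, hki, hkx, hkj, ?_⟩
      rw [List.getD_eq_getElem _ _ hkj]
      exact Option.some.inj h

theorem set2_decomp {b : List (List Int)} {y x : Int} {ki kj : Nat} (v : Int)
    (hky : PySem.List.pyIdx? b.length y = some ki)
    (hkx : PySem.List.pyIdx? (b.getD ki []).length x = some kj) :
    set2 b y x v = b.set ki ((b.getD ki []).set kj v) := by
  have hki : ki < b.length := pyIdx?_lt hky
  have hrow : b[ki]? = some (b.getD ki []) := by
    rw [List.getD_eq_getElem _ _ hki]; exact List.getElem?_eq_getElem hki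
  simp only [set2, PySem.List.pySetD, PySem.List.pySet?, PySem.List.pyGetD,
    PySem.List.pyGet?, hky, Option.bind_some, hrow, Option.getD_some, hkx, Option.map_some]

theorem non3_set2_lt (b : List (List Int)) (y x v : Int)
    (h : pyGet2? b y x = some v) (hv : ¬ v = 3) :
    non3 (set2 b y x 3) < non3 b := by
  rw [pyGet2?] at h
  obtain ⟨ki, kj, hky, hki, hkx, hkj, hcell⟩ := pyGet2?_decomp h
  rw [set2_decomp 3 hky hkx]
  exact non3_setRow_lt b ki kj hki hkj (by rw [hcell]; exact hv)

-- the inner for-loop of Source B: push the 0-valued neighbours (stack top = list head)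
def pushNbrs (b : List (List Int)) (cx cy : Int) (st : List (Int × Int)) :
    Option (List (Int × Int)) :=
  List.foldl
    (fun acc d =>
      match acc with
      | none => none
      | some s =>
        match pyGet2? b (cy + d.2) (cx + d.1) with
        | none => none
        | some v => if v = 0 then some ((cx + d.1, cy + d.2) :: s) else some s)
    (some st) dirsB

def loopB : List (List Int) → List (Int × Int) → Int → Option (List (List Int) × Int)
  | b, [], c => some (b, c)
  | b, (cx, cy) :: rest, c =>
    match h : pyGet2? b cy cx with
    | none => none
    | some v =>
      if hv : v = 3 then loopB b rest c
      else
        match pushNbrs (set2 b cy cx 3) cx cy rest with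
        | none => none
        | some st => loopB (set2 b cy cx 3) st (c + 1)
termination_by b st _ => (non3 b, st.length)
decreasing_by
  · exact Prod.Lex.right _ (by simp)
  · exact Prod.Lex.left _ _ (non3_set2_lt b cy cx v h hv)


def divide_area_alt (oddeven_board : List (List Int)) (x : Int) (y : Int) : Int :=
  match pyGet2? oddeven_board y x with
  | none => 0
  | some v =>
    if v = 1 ∨ v = 2 then 0
    else
      match loopB oddeven_board [(x, y)] 0 with
      | none => 0
      | some (_, n) => if PySem.Int.mod n 2 = 1 then 1 else 2

-- ===== PRECONDITION & SPEC =====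
-- cell at normalized (non-negative) indices
def cellN (b : List (List Int)) (i j : Nat) : Int := (b.getD i []).getD j 0


-- no 0 anywhere on the four border rows/columns
def borderB (b : List (List Int)) (R C : Nat) : Bool :=
  (List.range R).all fun i =>
    (List.range C).all fun j =>
      !((i == 0 || i == R - 1 || j == 0 || j == C - 1) && (cellN b i j == 0))

-- Pre_ admits: (a) any board and index on which the start cell reads as 1 or 2 (A returns 0 at
-- once); (b) otherwise a rectangular board of at least 9×9 (A's final loop reads rows/columns
-- 1..8 and raises IndexError on smaller boards), whose start cell is strictly interior and does
-- not already hold the fill's internal mark 3 (a board already containing the sentinel is an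
-- accidental state: A counts that cell as empty, B's fill skips it, neither value is specified),
-- and with no 0 anywhere on the four border rows/columns — conservatively ruling out fills that
-- could run off the edge (A raises IndexError there); this conservatism also excludes some
-- boards whose border 0s are unreachable, on which A and B return the same value.
def preB (board : List (List Int)) (x y : Int) : Bool :=
  match board with
  | [] => false
  | r0 :: _ =>
    board.all (fun r => r.length == r0.length) &&
    (match pyGet2? board y x with
     | none => false
     | some v =>
       if v == 1 || v == 2 then true
       else
         !(v == 3) && decide (9 ≤ board.length) && decide (9 ≤ r0.length) &&
         (match PySem.List.pyIdx? board.length y, PySem.List.pyIdx? r0.length x with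
          | some ki, some kj =>
            decide (1 ≤ ki ∧ ki ≤ board.length - 2 ∧ 1 ≤ kj ∧ kj ≤ r0.length - 2)
          | _, _ => false) &&
         borderB board board.length r0.length)

def Pre_divide_area (oddeven_board : List (List Int)) (x : Int) (y : Int) : Prop :=
  preB oddeven_board x y = true

instance (oddeven_board : List (List Int)) (x : Int) (y : Int) :
    Decidable (Pre_divide_area oddeven_board x y) := by
  unfold Pre_divide_area; infer_instance

def pvWitness_divide_area : List (List Int) × Int × Int :=
  ([[5, 5, 5, 5, 5, 5, 5, 5, 5],
    [5, 0, 0, 0, 0, 0, 0, 0, 5],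
    [5, 0, 0, 0, 0, 0, 0, 0, 5],
    [5, 5, 5, 5, 5, 5, 5, 5, 5],
    [5, 5, 5, 5, 5, 5, 5, 5, 5],
    [5, 5, 5, 5, 5, 5, 5, 5, 5],
    [5, 5, 5, 5, 5, 5, 5, 5, 5],
    [5, 5, 5, 5, 5, 5, 5, 5, 5],
    [5, 5, 5, 5, 5, 5, 5, 5, 5]], 1, 1)

def Spec_divide_area (oddeven_board : List (List Int)) (x : Int) (y : Int) (out : Int) : Prop :=
  out = divide_area_alt oddeven_board x y
instance (oddeven_board : List (List Int)) (x : Int) (y : Int) (out : Int) :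
    Decidable (Spec_divide_area oddeven_board x y out) := by
  unfold Spec_divide_area; infer_instance

-- ===== CLAIM (what is proved, stated in full; the proofs are below) =====
def Claim_equal_divide_area : Prop := ∀ (oddeven_board : List (List Int)) (x : Int) (y : Int), Dom_divide_area oddeven_board x y → Pre_divide_area oddeven_board x y → Spec_divide_area oddeven_board x y (divide_area oddeven_board x y)

-- ===== LEMMAS AND PROOFS =====

def Shape (R C : Nat) (b : List (List Int)) : Prop :=
  b.length = R ∧ ∀ r ∈ b, r.length = C

def setCell (b : List (List Int)) (i j : Nat) (v : Int) : List (List Int) :=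
  b.set i ((b.getD i []).set j v)

theorem pyIdx?_shift {n : Nat} {i d : Int} {k : Nat} (h : PySem.List.pyIdx? n i = some k)
    (h1 : 1 ≤ k) (h2 : k ≤ n - 2) (hd : -1 ≤ d ∧ d ≤ 1) :
    PySem.List.pyIdx? n (i + d) = some ((k : Int) + d).toNat := by
  simp only [PySem.List.pyIdx?] at h ⊢
  split_ifs at h <;> simp_all <;> split_ifs <;> simp_all <;> omega

theorem get2_eq {R C : Nat} {b : List (List Int)} {y x : Int} {ki kj : Nat}
    (hS : Shape R C b) (hy : PySem.List.pyIdx? R y = some ki)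
    (hx : PySem.List.pyIdx? C x = some kj) :
    pyGet2? b y x = some (cellN b ki kj) := by
  obtain ⟨hR, hC⟩ := hS
  have hki : ki < R := pyIdx?_lt hy
  have hkj : kj < C := pyIdx?_lt hx
  set row := b.getD ki [] with hrowdef
  have hrow : b[ki]? = some row := by
    rw [hrowdef, List.getD_eq_getElem _ _ (by omega)]; exact List.getElem?_eq_getElem (by omega)
  have hrl : row.length = C := by
    refine hC _ ?_
    rw [hrowdef, List.getD_eq_getElem _ _ (by omega)]; exact List.getElem_mem (by omega)
  have hcell : row[kj]? = some (cellN b ki kj) := by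
    rw [cellN, ← hrowdef, List.getD_eq_getElem _ _ (by omega)]
    exact List.getElem?_eq_getElem (by omega)
  simp only [pyGet2?, PySem.List.pyGet?, hR, hy, Option.bind_some, hrow, hrl, hx, hcell]

theorem set2_eq {R C : Nat} {b : List (List Int)} {y x : Int} {ki kj : Nat} (v : Int)
    (hS : Shape R C b) (hy : PySem.List.pyIdx? R y = some ki)
    (hx : PySem.List.pyIdx? C x = some kj) :
    set2 b y x v = setCell b ki kj v := by
  obtain ⟨hR, hC⟩ := hS
  have hki : ki < R := pyIdx?_lt hy
  have hkj : kj < C := pyIdx?_lt hx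
  set row := b.getD ki [] with hrowdef
  have hrow : b[ki]? = some row := by
    rw [hrowdef, List.getD_eq_getElem _ _ (by omega)]; exact List.getElem?_eq_getElem (by omega)
  have hrl : row.length = C := by
    refine hC _ ?_
    rw [hrowdef, List.getD_eq_getElem _ _ (by omega)]; exact List.getElem_mem (by omega)
  simp only [set2, setCell, PySem.List.pySetD, PySem.List.pySet?, PySem.List.pyGetD,
    PySem.List.pyGet?, hR, hy, Option.bind_some, hrow, Option.getD_some, hrl, hx,
    Option.map_some, ← hrowdef]

theorem shape_setCell {R C : Nat} {b : List (List Int)} {i j : Nat} {v : Int}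
    (hS : Shape R C b) (hi : i < R) : Shape R C (setCell b i j v) := by
  obtain ⟨hR, hC⟩ := hS
  refine ⟨by simp [setCell, hR], ?_⟩
  intro r hr
  rcases List.mem_or_eq_of_mem_set hr with h | h
  · exact hC _ h
  · subst h
    rw [List.length_set]
    refine hC _ ?_
    rw [List.getD_eq_getElem _ _ (by omega)]; exact List.getElem_mem (by omega)

theorem rowlen {R C : Nat} {b : List (List Int)} (hS : Shape R C b) {i : Nat} (hi : i < R) :
    (b.getD i []).length = C := by
  obtain ⟨hR, hC⟩ := hS
  refine hC _ ?_
  rw [List.getD_eq_getElem _ _ (by omega)]; exact List.getElem_mem (by omega)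

theorem getD_set_self {A : Type} (b : List A) (r : A) (i : Nat) (d : A) (h : i < b.length) :
    (b.set i r).getD i d = r := by
  simp [List.getD_eq_getElem?_getD, List.getElem?_set_self', List.getElem?_eq_getElem h]

theorem getD_set_ne {A : Type} (b : List A) (r : A) (i k : Nat) (d : A) (hne : k ≠ i) :
    (b.set i r).getD k d = b.getD k d := by
  simp [List.getD_eq_getElem?_getD, List.getElem?_set_ne hne.symm]

theorem cellN_setCell {R C : Nat} {b : List (List Int)} {ki kj : Nat} {v : Int}
    (hS : Shape R C b) (hki : ki < R) (hkj : kj < C) (i j : Nat) (hi : i < R) (hj : j < C) :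
    cellN (setCell b ki kj v) i j = if i = ki ∧ j = kj then v else cellN b i j := by
  have hR := hS.1
  have hrl : (b.getD ki []).length = C := rowlen hS hki
  by_cases hik : i = ki
  · subst hik
    rw [cellN, setCell, getD_set_self _ _ _ _ (by omega)]
    by_cases hjk : j = kj
    · subst hjk
      rw [getD_set_self _ _ _ _ (by omega)]
      simp
    · rw [getD_set_ne _ _ _ _ _ hjk]
      simp [hjk, cellN]
  · rw [cellN, setCell, getD_set_ne _ _ _ _ _ hik]
    simp [hik, cellN]

theorem zeros_setCell {R C : Nat} {b : List (List Int)} {ki kj : Nat}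
    (hS : Shape R C b) (hki : ki < R) (hkj : kj < C) :
    zeros (setCell b ki kj 3) = zeros b - (if cellN b ki kj = 0 then 1 else 0) ∧
      (cellN b ki kj = 0 → 1 ≤ zeros b) := by
  have hR := hS.1
  set row := b.getD ki [] with hrowdef
  have hrl : row.length = C := rowlen hS hki
  set p : Int → Bool := fun v => v == 0 with hp
  set e : Nat := if cellN b ki kj = 0 then 1 else 0 with he
  have hcell : row.getD kj 0 = cellN b ki kj := by rw [cellN]
  have hrowget : row[kj] = cellN b ki kj := by
    rw [← hcell]
    exact (List.getD_eq_getElem _ _ (by omega)).symm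
  have hcount : (row.set kj 3).countP p = row.countP p - e := by
    rw [List.countP_set (by omega)]
    simp [hp, he, hrowget]
  have hle : e ≤ row.countP p := by
    by_cases hcz : cellN b ki kj = 0
    · have : 0 < row.countP p :=
        List.countP_pos_iff.mpr ⟨row[kj], List.getElem_mem _, by simp [hp, hrowget, hcz]⟩
      simp only [he, hcz, if_true]
      omega
    · simp [he, hcz]
  have hmap : zeros (setCell b ki kj 3) = ((b.map (fun r => r.countP p)).set ki ((row.set kj 3).countP p)).sum := by
    rw [zeros, setCell, List.map_set, ← hrowdef]
  have hsum := sum_set_nat (b.map (fun r => r.countP p)) ki ((row.set kj 3).countP p) (by simp; omega)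
  have hgetmap : (b.map (fun r => r.countP p)).getD ki 0 = row.countP p := by
    rw [List.getD_eq_getElem _ _ (by simp; omega)]
    simp only [List.getElem_map]
    congr 1
    rw [hrowdef, List.getD_eq_getElem _ _ (by omega)]
  have hz : zeros b = (b.map (fun r => r.countP p)).sum := by rw [zeros]
  rw [hmap]
  constructor
  · omega
  · intro hcz
    have : 0 < row.countP p := List.countP_pos_iff.mpr ⟨row[kj], List.getElem_mem _, by simp [hp, hrowget, hcz]⟩
    have hrowle : row.countP p ≤ zeros b := by
      rw [hz]
      have := sum_set_nat (b.map (fun r => r.countP p)) ki 0 (by simp; omega)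
      omega
    omega

def Border (R C : Nat) (b : List (List Int)) : Prop :=
  ∀ i < R, ∀ j < C, (i = 0 ∨ i = R - 1 ∨ j = 0 ∨ j = C - 1) → cellN b i j ≠ 0

def Good (R C : Nat) (b : List (List Int)) : Prop :=
  Shape R C b ∧ Border R C b ∧ 9 ≤ R ∧ 9 ≤ C

def PtInter (n k : Nat) : Prop := 1 ≤ k ∧ k ≤ n - 2

def ExtB (R C : Nat) (b b' : List (List Int)) : Prop :=
  Shape R C b' ∧ ∀ i < R, ∀ j < C,
    cellN b' i j = cellN b i j ∨ (cellN b i j ≠ 3 ∧ cellN b' i j = 3)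

theorem extB_refl {R C : Nat} {b : List (List Int)} (hS : Shape R C b) : ExtB R C b b :=
  ⟨hS, fun _ _ _ _ => Or.inl rfl⟩

theorem extB_trans {R C : Nat} {b1 b2 b3 : List (List Int)}
    (h12 : ExtB R C b1 b2) (h23 : ExtB R C b2 b3) : ExtB R C b1 b3 := by
  refine ⟨h23.1, fun i hi j hj => ?_⟩
  rcases h12.2 i hi j hj with h | ⟨hn, he⟩ <;> rcases h23.2 i hi j hj with h' | ⟨hn', he'⟩
  · exact Or.inl (h'.trans h)
  · exact Or.inr ⟨by rw [← h]; exact hn', he'⟩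
  · exact Or.inr ⟨hn, h' ▸ he⟩
  · exact Or.inr ⟨hn, he'⟩

theorem extB_setCell {R C : Nat} {b : List (List Int)} {ki kj : Nat}
    (hS : Shape R C b) (hki : ki < R) (hkj : kj < C) : ExtB R C b (setCell b ki kj 3) := by
  refine ⟨shape_setCell hS hki, fun i hi j hj => ?_⟩
  rw [cellN_setCell hS hki hkj i j hi hj]
  by_cases hij : i = ki ∧ j = kj
  · rw [if_pos hij]
    by_cases h3 : cellN b i j = 3
    · exact Or.inl h3.symm
    · exact Or.inr ⟨h3, rfl⟩
  · exact Or.inl (if_neg hij)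

theorem good_of_extB {R C : Nat} {b b' : List (List Int)}
    (hG : Good R C b) (hE : ExtB R C b b') : Good R C b' := by
  obtain ⟨hS, hB, hR9, hC9⟩ := hG
  refine ⟨hE.1, fun i hi j hj hedge => ?_, hR9, hC9⟩
  rcases hE.2 i hi j hj with h | ⟨_, he⟩
  · rw [h]; exact hB i hi j hj hedge
  · rw [he]; omega

def AsuccP (fa : Nat) : Prop := ∀ (R C : Nat) (b : List (List Int)) (x y : Int) (ki kj : Nat)
    (c : Int), Good R C b →
    PySem.List.pyIdx? R y = some ki → PySem.List.pyIdx? C x = some kj →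
    PtInter R ki → PtInter C kj →
    (cellN b ki kj = 0 → zeros b + 1 ≤ fa) → (cellN b ki kj ≠ 0 → zeros b + 2 ≤ fa) →
    ∃ b' c', visitA fa b x y c = some (b', c') ∧ Good R C b' ∧ ExtB R C b b' ∧
      zeros b' ≤ zeros b ∧ (cellN b ki kj = 0 → zeros b' < zeros b)

def AdirsP (fa : Nat) : Prop := ∀ (ds : List (Int × Int)),
    (∀ d ∈ ds, -1 ≤ d.1 ∧ d.1 ≤ 1 ∧ -1 ≤ d.2 ∧ d.2 ≤ 1) →
    ∀ (R C : Nat) (b : List (List Int)) (x y : Int) (ki kj : Nat) (c : Int),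
    Good R C b →
    PySem.List.pyIdx? R y = some ki → PySem.List.pyIdx? C x = some kj →
    PtInter R ki → PtInter C kj →
    zeros b + 1 ≤ fa →
    ∃ b' c', visitDirs fa ds b x y c = some (b', c') ∧ Good R C b' ∧ ExtB R C b b' ∧
      zeros b' ≤ zeros b

theorem interior_of_zero {R C : Nat} {b : List (List Int)} {ki kj : Nat}
    (hG : Good R C b) (hki : ki < R) (hkj : kj < C) (h0 : cellN b ki kj = 0) :
    PtInter R ki ∧ PtInter C kj := by
  by_cases hedge : ki = 0 ∨ ki = R - 1 ∨ kj = 0 ∨ kj = C - 1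
  · exact absurd h0 (hG.2.1 ki hki kj hkj hedge)
  · push Not at hedge
    exact ⟨⟨by omega, by omega⟩, ⟨by omega, by omega⟩⟩

theorem visit_ok_aux : ∀ fa : Nat, AsuccP fa ∧ AdirsP fa := by
  intro fa
  induction fa with
  | zero =>
    constructor
    · intro R C b x y ki kj c hG hky hkx hIy hIx h0 hn0
      exfalso
      by_cases hc : cellN b ki kj = 0
      · have := h0 hc; omega
      · have := hn0 hc; omega
    · intro ds hds R C b x y ki kj c hG hky hkx hIy hIx hfa
      exfalso; omega
  | succ n ih =>
    have hsucc : AsuccP (n + 1) := by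
      intro R C b x y ki kj c hG hky hkx hIy hIx h0 hn0
      have hki : ki < R := pyIdx?_lt hky
      have hkj : kj < C := pyIdx?_lt hkx
      have hset : set2 b y x 3 = setCell b ki kj 3 := set2_eq 3 hG.1 hky hkx
      have hE1 : ExtB R C b (setCell b ki kj 3) := extB_setCell hG.1 hki hkj
      have hG1 : Good R C (setCell b ki kj 3) := good_of_extB hG hE1
      obtain ⟨hz1, hz1'⟩ := zeros_setCell hG.1 hki hkj (b := b)
      have hfa : zeros (setCell b ki kj 3) + 1 ≤ n := by
        by_cases hc : cellN b ki kj = 0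
        · have := h0 hc; have := hz1' hc; simp [hc] at hz1; omega
        · have := hn0 hc; simp [hc] at hz1; omega
      obtain ⟨b', c', hrun, hG', hE', hzle⟩ :=
        ih.2 dirsA (by decide) R C (setCell b ki kj 3) x y ki kj (c + 1) hG1 hky hkx hIy hIx hfa
      refine ⟨b', c', ?_, hG', extB_trans hE1 hE', ?_, ?_⟩
      · rw [visitA, hset]; exact hrun
      · by_cases hc : cellN b ki kj = 0 <;> simp [hc] at hz1 <;> omega
      · intro hc
        have := hz1' hc
        simp [hc] at hz1
        omega
    refine ⟨hsucc, ?_⟩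
    intro ds hds
    induction ds with
    | nil =>
      intro R C b x y ki kj c hG hky hkx hIy hIx hfa
      exact ⟨b, c, by rw [visitDirs], hG, extB_refl hG.1, le_refl _⟩
    | cons d ds ihds =>
      intro R C b x y ki kj c hG hky hkx hIy hIx hfa
      have hdb := hds d (List.mem_cons_self ..)
      have hky' : PySem.List.pyIdx? R (y + d.2) = some ((ki : Int) + d.2).toNat :=
        pyIdx?_shift hky hIy.1 hIy.2 ⟨hdb.2.2.1, hdb.2.2.2⟩
      have hkx' : PySem.List.pyIdx? C (x + d.1) = some ((kj : Int) + d.1).toNat :=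
        pyIdx?_shift hkx hIx.1 hIx.2 ⟨hdb.1, hdb.2.1⟩
      set ki' := ((ki : Int) + d.2).toNat
      set kj' := ((kj : Int) + d.1).toNat
      have hki' : ki' < R := pyIdx?_lt hky'
      have hkj' : kj' < C := pyIdx?_lt hkx'
      have hread : pyGet2? b (y + d.2) (x + d.1) = some (cellN b ki' kj') :=
        get2_eq hG.1 hky' hkx'
      by_cases hw : cellN b ki' kj' = 0
      · obtain ⟨hIy', hIx'⟩ := interior_of_zero hG hki' hkj' hw
        obtain ⟨b2, c2, hrun2, hG2, hE2, hzle2, hzlt2⟩ :=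
          hsucc R C b (x + d.1) (y + d.2) ki' kj' c hG hky' hkx' hIy' hIx'
            (fun _ => by omega) (fun hc => absurd hw hc)
        have hzlt := hzlt2 hw
        obtain ⟨b', c', hrun', hG', hE', hzle'⟩ :=
          ihds (fun e he => hds e (List.mem_cons_of_mem _ he)) R C b2 x y ki kj c2 hG2 hky hkx
            hIy hIx (by omega)
        refine ⟨b', c', ?_, hG', extB_trans hE2 hE', by omega⟩
        rw [visitDirs, hread]
        simp only [hw, if_pos rfl, hrun2]
        exact hrun'
      · obtain ⟨b', c', hrun', hG', hE', hzle'⟩ :=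
          ihds (fun e he => hds e (List.mem_cons_of_mem _ he)) R C b x y ki kj c hG hky hkx
            hIy hIx hfa
        refine ⟨b', c', ?_, hG', hE', hzle'⟩
        rw [visitDirs, hread]
        simp only [if_neg hw]
        exact hrun'

def pushed (b : List (List Int)) (x y : Int) (ds : List (Int × Int)) : List (Int × Int) :=
  ds.filterMap fun d =>
    if pyGet2? b (y + d.2) (x + d.1) = some 0 then some (x + d.1, y + d.2) else none

theorem loopB_nil (b : List (List Int)) (c : Int) : loopB b [] c = some (b, c) := by
  rw [loopB]

theorem loopB_cons (b : List (List Int)) (x y : Int) (rest : List (Int × Int)) (c : Int)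
    (v : Int) (hread : pyGet2? b y x = some v) :
    loopB b ((x, y) :: rest) c =
      if v = 3 then loopB b rest c
      else
        match pushNbrs (set2 b y x 3) x y rest with
        | none => none
        | some st => loopB (set2 b y x 3) st (c + 1) := by
  rw [loopB]
  split
  · rename_i heq; rw [hread] at heq; exact absurd heq (by simp)
  · rename_i w heq
    rw [hread] at heq
    obtain rfl : v = w := Option.some.inj heq
    by_cases hv : v = 3
    · rw [dif_pos hv, if_pos hv]
    · rw [dif_neg hv, if_neg hv]

theorem pushNbrs_eq {R C : Nat} {b : List (List Int)} {cx cy : Int} {ki kj : Nat}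
    (hS : Shape R C b) (hky : PySem.List.pyIdx? R cy = some ki)
    (hkx : PySem.List.pyIdx? C cx = some kj) (hIy : PtInter R ki) (hIx : PtInter C kj)
    (st : List (Int × Int)) :
    pushNbrs b cx cy st = some (pushed b cx cy dirsA ++ st) := by
  have hgen : ∀ dx dy : Int, -1 ≤ dx → dx ≤ 1 → -1 ≤ dy → dy ≤ 1 →
      pyGet2? b (cy + dy) (cx + dx) =
        some (cellN b ((ki : Int) + dy).toNat ((kj : Int) + dx).toNat) := by
    intro dx dy a1 a2 a3 a4
    exact get2_eq hS (pyIdx?_shift hky hIy.1 hIy.2 ⟨a3, a4⟩)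
      (pyIdx?_shift hkx hIx.1 hIx.2 ⟨a1, a2⟩)
  have h11 := hgen 1 1 (by norm_num) (by norm_num) (by norm_num) (by norm_num)
  have h10 := hgen 1 0 (by norm_num) (by norm_num) (by norm_num) (by norm_num)
  have h01 := hgen 0 (-1) (by norm_num) (by norm_num) (by norm_num) (by norm_num)
  have hm0 := hgen (-1) 0 (by norm_num) (by norm_num) (by norm_num) (by norm_num)
  simp only [pushNbrs, dirsB, pushed, dirsA, List.foldl, List.filterMap]
  simp only [h11, h10, h01, hm0, Option.some.injEq]
  by_cases c1 : cellN b ki ((kj : Int) + -1).toNat = 0 <;>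
    by_cases c2 : cellN b ((ki : Int) + -1).toNat kj = 0 <;>
    by_cases c3 : cellN b ki (kj + 1) = 0 <;>
    by_cases c4 : cellN b (ki + 1) (kj + 1) = 0 <;>
    simp [c1, c2, c3, c4]

def SsimP (fa : Nat) : Prop := ∀ (R C : Nat) (b : List (List Int)) (x y : Int) (ki kj : Nat)
    (c : Int) (b1 : List (List Int)) (c1 : Int),
    visitA fa b x y c = some (b1, c1) → Good R C b →
    PySem.List.pyIdx? R y = some ki → PySem.List.pyIdx? C x = some kj →
    PtInter R ki → PtInter C kj → cellN b ki kj ≠ 3 →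
    Good R C b1 ∧ ExtB R C b b1 ∧ ∀ rest, loopB b ((x, y) :: rest) c = loopB b1 rest c1

def SdirsP (fa : Nat) : Prop := ∀ (ds : List (Int × Int)),
    (∀ d ∈ ds, -1 ≤ d.1 ∧ d.1 ≤ 1 ∧ -1 ≤ d.2 ∧ d.2 ≤ 1) →
    ∀ (R C : Nat) (bM b : List (List Int)) (x y : Int) (ki kj : Nat) (c : Int)
      (b1 : List (List Int)) (c1 : Int),
    visitDirs fa ds b x y c = some (b1, c1) → Good R C b → Shape R C bM → ExtB R C bM b →
    PySem.List.pyIdx? R y = some ki → PySem.List.pyIdx? C x = some kj →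
    PtInter R ki → PtInter C kj →
    Good R C b1 ∧ ExtB R C b b1 ∧
      ∀ rest, loopB b (pushed bM x y ds ++ rest) c = loopB b1 rest c1

theorem sdirs_of_ssim (fa : Nat) (hsim : SsimP fa) : SdirsP fa := by
  intro ds hds
  induction ds with
  | nil =>
    intro R C bM b x y ki kj c b1 c1 hrun hG hSM hEM hky hkx hIy hIx
    rw [visitDirs] at hrun
    obtain ⟨rfl, rfl⟩ : b = b1 ∧ c = c1 := by
      have := Option.some.inj hrun; exact ⟨congrArg Prod.fst this, congrArg Prod.snd this⟩
    exact ⟨hG, extB_refl hG.1, fun rest => by simp [pushed]⟩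
  | cons d ds ihds =>
    intro R C bM b x y ki kj c b1 c1 hrun hG hSM hEM hky hkx hIy hIx
    have hdb := hds d (List.mem_cons_self ..)
    have hds' : ∀ e ∈ ds, -1 ≤ e.1 ∧ e.1 ≤ 1 ∧ -1 ≤ e.2 ∧ e.2 ≤ 1 :=
      fun e he => hds e (List.mem_cons_of_mem _ he)
    have hky' : PySem.List.pyIdx? R (y + d.2) = some ((ki : Int) + d.2).toNat :=
      pyIdx?_shift hky hIy.1 hIy.2 ⟨hdb.2.2.1, hdb.2.2.2⟩
    have hkx' : PySem.List.pyIdx? C (x + d.1) = some ((kj : Int) + d.1).toNat :=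
      pyIdx?_shift hkx hIx.1 hIx.2 ⟨hdb.1, hdb.2.1⟩
    set ki' := ((ki : Int) + d.2).toNat with hki'def
    set kj' := ((kj : Int) + d.1).toNat with hkj'def
    have hki' : ki' < R := pyIdx?_lt hky'
    have hkj' : kj' < C := pyIdx?_lt hkx'
    have hrb : pyGet2? b (y + d.2) (x + d.1) = some (cellN b ki' kj') :=
      get2_eq hG.1 hky' hkx'
    have hrM : pyGet2? bM (y + d.2) (x + d.1) = some (cellN bM ki' kj') :=
      get2_eq hSM hky' hkx'
    rw [visitDirs, hrb] at hrun
    dsimp only at hrun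
    by_cases hb0 : cellN b ki' kj' = 0
    · -- A recurses into the neighbour
      have hm0 : cellN bM ki' kj' = 0 := by
        rcases hEM.2 ki' hki' kj' hkj' with h | ⟨_, he⟩
        · rw [← h]; exact hb0
        · rw [he] at hb0; exact absurd hb0 (by norm_num)
      rw [if_pos hb0] at hrun
      rcases ha : visitA fa b (x + d.1) (y + d.2) c with _ | ⟨b2, c2⟩
      · rw [ha] at hrun; exact absurd hrun (by simp)
      · rw [ha] at hrun
        obtain ⟨hIy', hIx'⟩ := interior_of_zero hG hki' hkj' hb0
        obtain ⟨hG2, hE2, hloop⟩ :=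
          hsim R C b (x + d.1) (y + d.2) ki' kj' c b2 c2 ha hG hky' hkx' hIy' hIx'
            (by rw [hb0]; norm_num)
        obtain ⟨hG1, hE1, hloop2⟩ :=
          ihds hds' R C bM b2 x y ki kj c2 b1 c1 hrun hG2 hSM (extB_trans hEM hE2)
            hky hkx hIy hIx
        refine ⟨hG1, extB_trans hE2 hE1, fun rest => ?_⟩
        have hpush : pushed bM x y (d :: ds) =
            (x + d.1, y + d.2) :: pushed bM x y ds := by
          simp [pushed, List.filterMap_cons, hrM, hm0]
        rw [hpush, List.cons_append, hloop (pushed bM x y ds ++ rest), hloop2]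
    · -- A skips the neighbour
      rw [if_neg hb0] at hrun
      obtain ⟨hG1, hE1, hloop2⟩ :=
        ihds hds' R C bM b x y ki kj c b1 c1 hrun hG hSM hEM hky hkx hIy hIx
      refine ⟨hG1, hE1, fun rest => ?_⟩
      by_cases hm0 : cellN bM ki' kj' = 0
      · have hb3 : cellN b ki' kj' = 3 := by
          rcases hEM.2 ki' hki' kj' hkj' with h | ⟨_, he⟩
          · rw [h, hm0] at hb0; exact absurd rfl hb0
          · exact he
        have hpush : pushed bM x y (d :: ds) =
            (x + d.1, y + d.2) :: pushed bM x y ds := by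
          simp [pushed, List.filterMap_cons, hrM, hm0]
        rw [hpush, List.cons_append,
          loopB_cons b (x + d.1) (y + d.2) _ c (cellN b ki' kj') hrb, if_pos hb3]
        exact hloop2 rest
      · have hpush : pushed bM x y (d :: ds) = pushed bM x y ds := by
          simp [pushed, List.filterMap_cons, hrM, hm0]
        rw [hpush]
        exact hloop2 rest

theorem ssim_all : ∀ fa : Nat, SsimP fa := by
  intro fa
  induction fa with
  | zero =>
    intro R C b x y ki kj c b1 c1 hrun
    rw [visitA] at hrun
    exact absurd hrun (by simp)
  | succ n ihn =>
    intro R C b x y ki kj c b1 c1 hrun hG hky hkx hIy hIx h3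
    have hki : ki < R := pyIdx?_lt hky
    have hkj : kj < C := pyIdx?_lt hkx
    rw [visitA] at hrun
    have hset : set2 b y x 3 = setCell b ki kj 3 := set2_eq 3 hG.1 hky hkx
    rw [hset] at hrun
    have hE1 : ExtB R C b (setCell b ki kj 3) := extB_setCell hG.1 hki hkj
    have hG1 : Good R C (setCell b ki kj 3) := good_of_extB hG hE1
    obtain ⟨hG', hE', hloop⟩ :=
      sdirs_of_ssim n ihn dirsA (by decide) R C (setCell b ki kj 3) (setCell b ki kj 3)
        x y ki kj (c + 1) b1 c1 hrun hG1 hG1.1 (extB_refl hG1.1) hky hkx hIy hIx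
    refine ⟨hG', extB_trans hE1 hE', fun rest => ?_⟩
    have hread : pyGet2? b y x = some (cellN b ki kj) := get2_eq hG.1 hky hkx
    rw [loopB_cons b x y rest c (cellN b ki kj) hread, if_neg h3, hset]
    rw [pushNbrs_eq hG1.1 hky hkx hIy hIx rest]
    exact hloop rest

theorem foldOpt_unit (g : Int → Option Unit) (l : List Int) (h : ∀ e ∈ l, g e = some ()) :
    List.foldl (fun acc e => match acc with | none => none | some _ => g e) (some ()) l
      = some () := by
  induction l with
  | nil => rfl
  | cons a t ih =>
    simp only [List.foldl_cons]
    rw [h a (List.mem_cons_self ..)]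
    exact ih (fun e he => h e (List.mem_cons_of_mem _ he))

theorem pyIdx?_of_lt {n : Nat} {i : Int} (h0 : 0 ≤ i) (h1 : i < n) :
    PySem.List.pyIdx? n i = some i.toNat := by
  simp only [PySem.List.pyIdx?]
  split_ifs <;> first | rfl | omega

theorem checkLoop_ok {R C : Nat} {b : List (List Int)} (hG : Good R C b) :
    checkLoop b = some () := by
  rw [checkLoop]
  apply foldOpt_unit
  intro yy hyy
  have hby : 1 ≤ yy ∧ yy < 9 := PySem.List.mem_pyRange_one.mp hyy
  apply foldOpt_unit
  intro xx hxx
  have hbx : 1 ≤ xx ∧ xx < 9 := PySem.List.mem_pyRange_one.mp hxx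
  have hky : PySem.List.pyIdx? R yy = some yy.toNat :=
    pyIdx?_of_lt (by omega) (by have := hG.2.2.1; omega)
  have hkx : PySem.List.pyIdx? C xx = some xx.toNat :=
    pyIdx?_of_lt (by omega) (by have := hG.2.2.2; omega)
  rw [get2_eq hG.1 hky hkx]
  dsimp only
  split_ifs <;> rfl

-- ===== VERDICT (by name: the statement is the Claim_ definition above) =====
theorem divide_area_spec : Claim_equal_divide_area := by
  intro board x y hDom hPre
  unfold Spec_divide_area
  unfold Pre_divide_area at hPre
  cases board with
  | nil => exact absurd hPre (by simp [preB])
  | cons r0 rs =>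
    rw [preB, Bool.and_eq_true] at hPre
    obtain ⟨hrect, hrest⟩ := hPre
    have hS : Shape (r0 :: rs).length r0.length (r0 :: rs) := by
      refine ⟨rfl, fun r hr => ?_⟩
      rw [List.all_eq_true] at hrect
      simpa using hrect r hr
    rcases hread : pyGet2? (r0 :: rs) y x with _ | v
    · rw [hread] at hrest; exact absurd hrest (by simp)
    · rw [hread] at hrest
      dsimp only at hrest
      by_cases hv12 : v = 1 ∨ v = 2
      · have hb12 : (v == 1 || v == 2) = true := by
          rcases hv12 with h | h <;> simp [h]
        rw [divide_area, divide_area_alt, hread]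
        dsimp only
        rw [if_pos hv12, if_pos hv12]
      · have hb12 : (v == 1 || v == 2) = false := by
          simp only [Bool.or_eq_false_iff, beq_eq_false_iff_ne]
          exact ⟨fun h => hv12 (Or.inl h), fun h => hv12 (Or.inr h)⟩
        rw [hb12, if_neg (by simp)] at hrest
        rw [Bool.and_eq_true, Bool.and_eq_true, Bool.and_eq_true, Bool.and_eq_true] at hrest
        obtain ⟨⟨⟨⟨h3b, hR9b⟩, hC9b⟩, hidx⟩, hborder⟩ := hrest
        have hv3 : v ≠ 3 := by simpa using h3b
        have hR9 : 9 ≤ (r0 :: rs).length := by simpa using hR9b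
        have hC9 : 9 ≤ r0.length := by simpa using hC9b
        rcases hky : PySem.List.pyIdx? (r0 :: rs).length y with _ | ki
        · rw [hky] at hidx; exact absurd hidx (by simp)
        · rcases hkx : PySem.List.pyIdx? r0.length x with _ | kj
          · rw [hky, hkx] at hidx; exact absurd hidx (by simp)
          · rw [hky, hkx] at hidx
            have hint : 1 ≤ ki ∧ ki ≤ (r0 :: rs).length - 2 ∧ 1 ≤ kj ∧ kj ≤ r0.length - 2 :=
              of_decide_eq_true hidx
            have hIy : PtInter (r0 :: rs).length ki := ⟨hint.1, hint.2.1⟩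
            have hIx : PtInter r0.length kj := ⟨hint.2.2.1, hint.2.2.2⟩
            have hBorder : Border (r0 :: rs).length r0.length (r0 :: rs) := by
              intro i hi j hj hedge
              rw [borderB, List.all_eq_true] at hborder
              have h1 := hborder i (List.mem_range.mpr hi)
              rw [List.all_eq_true] at h1
              have h2 := h1 j (List.mem_range.mpr hj)
              simp only [Bool.not_and, Bool.or_eq_true, Bool.not_eq_eq_eq_not,
                Bool.not_true, Bool.or_eq_false_iff, beq_eq_false_iff_ne] at h2
              intro hc0
              rcases h2 with h2 | h2
              · rcases hedge with h | h | h | h <;> simp [h] at h2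
              · exact h2 hc0
            have hG : Good (r0 :: rs).length r0.length (r0 :: rs) := ⟨hS, hBorder, hR9, hC9⟩
            have hcellv : cellN (r0 :: rs) ki kj = v := by
              have := get2_eq hS hky hkx
              rw [hread] at this
              exact (Option.some.inj this).symm
            obtain ⟨b1, c1, hrunA, hG1, _, _, _⟩ :=
              (visit_ok_aux (zeros (r0 :: rs) + 2)).1 (r0 :: rs).length r0.length (r0 :: rs)
                x y ki kj 0 hG hky hkx hIy hIx (fun _ => by omega) (fun _ => by omega)
            obtain ⟨_, _, hloop⟩ :=
              ssim_all (zeros (r0 :: rs) + 2) (r0 :: rs).length r0.length (r0 :: rs)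
                x y ki kj 0 b1 c1 hrunA hG hky hkx hIy hIx (by rw [hcellv]; exact hv3)
            have hloopB : loopB (r0 :: rs) [(x, y)] 0 = some (b1, c1) := by
              rw [hloop [], loopB_nil]
            rw [divide_area, divide_area_alt, hread]
            dsimp only
            rw [if_neg hv12, if_neg hv12, hrunA, hloopB]
            dsimp only
            rw [checkLoop_ok hG1]
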